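-- pv_equiv track=rewrite | github.com/duttosourav8/Optimized-Cygnet | history_validity_gate.py | build_ro_history
-- ===== SOURCE A (Python) =====
-- from typing import Dict, List, Tuple, Union
--
-- Triple = Tuple[int, int, int, int]
--
-- def build_ro_history(triples: List[Triple]) -> Dict[int, Dict[int, List[int]]]:
--     ro_hist: Dict[int, Dict[int, List[int]]] = {}
--     for s, r, o, t in triples:
--         ro_hist.setdefault(r, {}).setdefault(o, []).append(t)
--
--     for r in ro_hist:
--         for obj in ro_hist[r]:
--             ro_hist[r][obj].sort()
--
--     return ro_hist
-- ===== SOURCE B (Python) =====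
-- from typing import Dict, List, Tuple
--
-- Triple = Tuple[int, int, int, int]
--
-- def build_ro_history(triples: List[Triple]) -> Dict[int, Dict[int, List[int]]]:
--     # Sort once globally by timestamp, then fill the buckets in one pass:
--     # pass 1 registers every (r, o) bucket in input order, pass 2 walks the
--     # timestamp-ordered triples and appends, so every list comes out
--     # ascending with no per-list sort at all.
--     ro_hist: Dict[int, Dict[int, List[int]]] = {}
--     for s, r, o, t in triples:
--         ro_hist.setdefault(r, {}).setdefault(o, [])
--     for s, r, o, t in sorted(triples, key=lambda x: x[3]):
--         ro_hist[r][o].append(t)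
--     return ro_hist
-- ===== Notes on version B (the rewrite author's own statement) =====
-- stated objective: alternative
-- what changed: Instead of grouping first and then sorting every per-(r,o) timestamp list, B sorts all triples once globally by timestamp and fills the pre-registered buckets in a single pass, so no per-list sort exists at all.
import Mathlib
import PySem

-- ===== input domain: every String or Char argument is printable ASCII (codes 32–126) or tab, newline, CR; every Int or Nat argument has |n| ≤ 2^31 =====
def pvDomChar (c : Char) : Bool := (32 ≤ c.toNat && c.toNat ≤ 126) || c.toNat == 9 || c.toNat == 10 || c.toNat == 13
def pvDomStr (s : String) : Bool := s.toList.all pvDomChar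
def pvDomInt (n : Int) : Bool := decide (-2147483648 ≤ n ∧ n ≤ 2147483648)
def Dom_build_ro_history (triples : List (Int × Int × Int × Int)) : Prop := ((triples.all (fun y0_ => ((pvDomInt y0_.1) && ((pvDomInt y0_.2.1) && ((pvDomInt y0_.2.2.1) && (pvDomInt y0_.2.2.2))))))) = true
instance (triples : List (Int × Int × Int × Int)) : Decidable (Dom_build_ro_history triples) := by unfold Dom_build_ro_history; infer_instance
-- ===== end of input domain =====

-- B sorts all triples once globally by timestamp and fills pre-registered buckets in one pass,
-- removing every per-list sort (alternative decomposition, same observable result; no mutation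
-- of the argument in either version).

-- ===== PORT A =====
-- ro_hist.setdefault(r, {}).setdefault(o, []).append(t)  ==  modify r {} (modify o [] (· ++ [t]));
-- the final nested in-place .sort() pass is the map over items; the dict is returned as its items.
def build_ro_history (triples : List (Int × Int × Int × Int)) : List (Int × List (Int × List Int)) :=
  let ro_hist := triples.foldl
    (fun d x => d.modify x.2.1 PySem.Dict.empty
      (fun inner => inner.modify x.2.2.1 [] (fun l => l ++ [x.2.2.2])))
    PySem.Dict.empty
  (ro_hist.items.map (fun p =>
    (p.1, p.2.items.map (fun q => (q.1, PySem.List.sorted q.2 (fun t => t) false)))))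

-- ===== PORT B =====
-- pass 1: setdefault(r, {}).setdefault(o, []) registers the bucket without changing it;
-- pass 2: ro_hist[r][o].append(t) — the keys are always present (registered in pass 1 from the
-- same triples), so modify's defaults are never reached and the port is exact.
def build_ro_history_alt (triples : List (Int × Int × Int × Int)) : List (Int × List (Int × List Int)) :=
  let registered := triples.foldl
    (fun d x => d.modify x.2.1 PySem.Dict.empty
      (fun inner => inner.modify x.2.2.1 [] (fun l => l)))
    PySem.Dict.empty
  let ordered := PySem.List.sorted triples (fun x => x.2.2.2) false
  let filled := ordered.foldl
    (fun d x => d.modify x.2.1 PySem.Dict.empty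
      (fun inner => inner.modify x.2.2.1 [] (fun l => l ++ [x.2.2.2])))
    registered
  (filled.items.map (fun p => (p.1, p.2.items)))

-- ===== PRECONDITION & SPEC =====
def Spec_build_ro_history (triples : List (Int × Int × Int × Int)) (out : List (Int × List (Int × List Int))) : Prop := out = build_ro_history_alt triples
instance (triples : List (Int × Int × Int × Int)) (out : List (Int × List (Int × List Int))) : Decidable (Spec_build_ro_history triples out) := by unfold Spec_build_ro_history; infer_instance

-- ===== CLAIM (what is proved, stated in full; the proofs are below) =====
def Claim_equal_build_ro_history : Prop := ∀ (triples : List (Int × Int × Int × Int)), Dom_build_ro_history triples → Spec_build_ro_history triples (build_ro_history triples)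

-- ===== LEMMAS AND PROOFS =====

-- A fold of `modify (key x)` steps, read back at one key c, is a fold of the payloads over the
-- sub-list of elements whose key is c (specific loop shape shared by both ports' grouping folds).
theorem getD_foldl_modify_by_key {α κ ν : Type} [BEq κ] [LawfulBEq κ] [DecidableEq κ]
    (l : List α) (key : α → κ) (d0 : ν) (f : α → ν → ν) (d : PySem.Dict κ ν) (c : κ) :
    (l.foldl (fun d x => d.modify (key x) d0 (f x)) d).getD c d0
      = (l.filter (fun x => key x == c)).foldl (fun v x => f x v) (d.getD c d0) := by
  induction l generalizing d with
  | nil => rfl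
  | cons a l ih =>
      simp only [List.foldl_cons, List.filter_cons]
      by_cases h : key a = c
      · simp [h, ih]
      · have hb : (key a == c) = false := by simp [h]
        rw [hb]
        simp only [Bool.false_eq_true, if_false]
        rw [ih, PySem.Dict.getD_modify, if_neg (fun hc => h hc.symm)]

-- the whole items view of a grouping fold over modify: one entry per distinct key, in
-- first-occurrence order, holding the fold of the payloads of that key's elements
theorem items_group_fold {α κ ν : Type} [BEq κ] [LawfulBEq κ] [DecidableEq κ]
    (l : List α) (key : α → κ) (d0 : ν) (f : α → ν → ν) :
    (l.foldl (fun d x => d.modify (key x) d0 (f x)) PySem.Dict.empty).items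
      = (PySem.Set.ofList (l.map key)).map (fun c =>
          (c, (l.filter (fun x => key x == c)).foldl (fun v x => f x v) d0)) := by
  have hnd : (l.foldl (fun d x => d.modify (key x) d0 (f x)) PySem.Dict.empty).keys.Nodup :=
    PySem.Dict.nodup_keys_foldl_modify_key l key d0 (fun _ x => f x) PySem.Dict.empty (by simp [PySem.Dict.keys_empty])
  rw [PySem.Dict.items_eq_map_keys _ hnd d0,
    PySem.Dict.keys_foldl_modify_key l key d0 (fun _ x => f x) PySem.Dict.empty]
  simp only [PySem.Dict.keys_empty, PySem.Set.update_nil_left]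
  exact List.map_congr_left (fun c _ => by
    rw [getD_foldl_modify_by_key l key d0 f PySem.Dict.empty c, PySem.Dict.getD_empty])

-- ===== A-side characterisation =====

theorem A_eq_canon (triples : List (Int × Int × Int × Int)) :
    build_ro_history triples
      = (PySem.Set.ofList (triples.map (fun x => x.2.1))).map (fun r =>
          (r, (PySem.Set.ofList (((triples.filter (fun x => x.2.1 == r)).map (fun x => x.2.2.1)))).map (fun o =>
            (o, PySem.List.sorted
                  (((triples.filter (fun x => x.2.1 == r)).filter (fun x => x.2.2.1 == o)).map
                    (fun x => x.2.2.2)) (fun t => t) false)))) := by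
  show (triples.foldl
      (fun d x => d.modify x.2.1 PySem.Dict.empty
        (fun inner => inner.modify x.2.2.1 [] (fun l => l ++ [x.2.2.2])))
      PySem.Dict.empty).items.map (fun p =>
        (p.1, p.2.items.map (fun q => (q.1, PySem.List.sorted q.2 (fun t => t) false)))) = _
  rw [items_group_fold triples (fun x => x.2.1) PySem.Dict.empty
    (fun x inner => inner.modify x.2.2.1 [] (fun l => l ++ [x.2.2.2]))]
  rw [List.map_map]
  refine List.map_congr_left (fun r _ => ?_)
  simp only [Function.comp]
  rw [items_group_fold (triples.filter (fun x => x.2.1 == r)) (fun x => x.2.2.1) []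
    (fun x l => l ++ [x.2.2.2])]
  rw [List.map_map]
  refine congrArg (Prod.mk r) (List.map_congr_left (fun o _ => ?_))
  simp only [Function.comp]
  rw [PySem.List.foldl_append_singleton_eq_map]
  simp

-- ===== B-side characterisation =====

-- adding only already-present elements leaves a set unchanged
theorem foldl_add_of_forall_mem {α : Type} [BEq α] [LawfulBEq α]
    (l : List α) (s : PySem.Set α) (h : ∀ x ∈ l, x ∈ s) :
    l.foldl (fun s b => s.add b) s = s := by
  induction l generalizing s with
  | nil => rfl
  | cons a t ih =>
      rw [List.foldl_cons, PySem.Set.add_of_mem (h a List.mem_cons_self)]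
      exact ih s (fun x hx => h x (List.mem_cons_of_mem a hx))

theorem set_update_of_forall_mem {α : Type} [BEq α] [LawfulBEq α]
    (s : PySem.Set α) (l : List α) (h : ∀ x ∈ l, x ∈ s) :
    s.update l = s := by
  conv_lhs => rw [← List.map_id l]
  rw [PySem.Set.update_map_eq_foldl_add]
  exact foldl_add_of_forall_mem l s h

-- B's loop shape: a register fold over l1 followed by a second fold over l2 whose keys all
-- occur in l1; keys come out in l1's first-occurrence order, each value is the chained fold
theorem items_two_pass {α κ ν : Type} [BEq κ] [LawfulBEq κ] [DecidableEq κ]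
    (l1 l2 : List α) (key : α → κ) (d0 : ν) (f g : α → ν → ν)
    (hsub : ∀ c ∈ l2.map key, c ∈ l1.map key) :
    (l2.foldl (fun d x => d.modify (key x) d0 (g x))
      (l1.foldl (fun d x => d.modify (key x) d0 (f x)) PySem.Dict.empty)).items
      = (PySem.Set.ofList (l1.map key)).map (fun c =>
          (c, (l2.filter (fun x => key x == c)).foldl (fun v x => g x v)
                ((l1.filter (fun x => key x == c)).foldl (fun v x => f x v) d0))) := by
  have hnd1 : (l1.foldl (fun d x => d.modify (key x) d0 (f x)) PySem.Dict.empty).keys.Nodup :=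
    PySem.Dict.nodup_keys_foldl_modify_key l1 key d0 (fun _ x => f x) PySem.Dict.empty
      (by simp [PySem.Dict.keys_empty])
  have hnd2 : (l2.foldl (fun d x => d.modify (key x) d0 (g x))
      (l1.foldl (fun d x => d.modify (key x) d0 (f x)) PySem.Dict.empty)).keys.Nodup :=
    PySem.Dict.nodup_keys_foldl_modify_key l2 key d0 (fun _ x => g x) _ hnd1
  have hk1 : (l1.foldl (fun d x => d.modify (key x) d0 (f x)) PySem.Dict.empty).keys
      = PySem.Set.ofList (l1.map key) := by
    rw [PySem.Dict.keys_foldl_modify_key l1 key d0 (fun _ x => f x) PySem.Dict.empty]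
    simp [PySem.Dict.keys_empty, PySem.Set.update_nil_left]
  have hk2 : (l2.foldl (fun d x => d.modify (key x) d0 (g x))
      (l1.foldl (fun d x => d.modify (key x) d0 (f x)) PySem.Dict.empty)).keys
      = PySem.Set.ofList (l1.map key) := by
    rw [PySem.Dict.keys_foldl_modify_key l2 key d0 (fun _ x => g x) _, hk1,
      set_update_of_forall_mem _ _ (fun c hc => by
        rw [PySem.Set.mem_ofList]; exact hsub c hc)]
  rw [PySem.Dict.items_eq_map_keys _ hnd2 d0, hk2]
  refine List.map_congr_left (fun c _ => ?_)
  rw [getD_foldl_modify_by_key l2 key d0 g _ c, getD_foldl_modify_by_key l1 key d0 f _ c,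
    PySem.Dict.getD_empty]

-- the timestamp projection of the filtered globally-sorted list IS the sorted projection of the
-- filtered original list
theorem map_filter_sorted_eq (triples : List (Int × Int × Int × Int))
    (p : (Int × Int × Int × Int) → Bool) :
    PySem.List.sorted ((triples.filter p).map (fun x => x.2.2.2)) (fun t => t) false
      = ((PySem.List.sorted triples (fun x => x.2.2.2) false).filter p).map (fun x => x.2.2.2) := by
  refine PySem.List.sorted_id_eq_of_perm_of_pairwise
    ((triples.filter p).map (fun x => x.2.2.2))
    (((PySem.List.sorted triples (fun x => x.2.2.2) false).filter p).map (fun x => x.2.2.2)) ?_ ?_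
  · exact ((PySem.List.sorted_perm triples (fun x => x.2.2.2) false).filter p).map (fun x => x.2.2.2)
  · have h1 : (PySem.List.sorted triples (fun x => x.2.2.2) false).Pairwise
        (fun a b => a.2.2.2 ≤ b.2.2.2) := PySem.List.sorted_pairwise triples (fun x => x.2.2.2)
    have h2 : ((PySem.List.sorted triples (fun x => x.2.2.2) false).filter p).Pairwise
        (fun a b => a.2.2.2 ≤ b.2.2.2) := h1.sublist List.filter_sublist
    exact List.pairwise_map.mpr h2

theorem B_eq_canon (triples : List (Int × Int × Int × Int)) :
    build_ro_history_alt triples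
      = (PySem.Set.ofList (triples.map (fun x => x.2.1))).map (fun r =>
          (r, (PySem.Set.ofList (((triples.filter (fun x => x.2.1 == r)).map (fun x => x.2.2.1)))).map (fun o =>
            (o, PySem.List.sorted
                  (((triples.filter (fun x => x.2.1 == r)).filter (fun x => x.2.2.1 == o)).map
                    (fun x => x.2.2.2)) (fun t => t) false)))) := by
  have hperm : (PySem.List.sorted triples (fun x => x.2.2.2) false).Perm triples :=
    PySem.List.sorted_perm triples (fun x => x.2.2.2) false
  show ((PySem.List.sorted triples (fun x => x.2.2.2) false).foldl
      (fun d x => d.modify x.2.1 PySem.Dict.empty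
        (fun inner => inner.modify x.2.2.1 [] (fun l => l ++ [x.2.2.2])))
      (triples.foldl
        (fun d x => d.modify x.2.1 PySem.Dict.empty
          (fun inner => inner.modify x.2.2.1 [] (fun l => l)))
        PySem.Dict.empty)).items.map (fun p => (p.1, p.2.items)) = _
  rw [items_two_pass triples (PySem.List.sorted triples (fun x => x.2.2.2) false)
    (fun x => x.2.1) PySem.Dict.empty
    (fun x inner => inner.modify x.2.2.1 [] (fun l => l))
    (fun x inner => inner.modify x.2.2.1 [] (fun l => l ++ [x.2.2.2]))
    (fun c hc => by
      simp only [List.mem_map] at hc ⊢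
      obtain ⟨x, hx, hxc⟩ := hc
      exact ⟨x, hperm.mem_iff.mp hx, hxc⟩)]
  rw [List.map_map]
  refine List.map_congr_left (fun r _ => ?_)
  simp only [Function.comp]
  refine congrArg (Prod.mk r) ?_
  rw [items_two_pass (triples.filter (fun x => x.2.1 == r))
    ((PySem.List.sorted triples (fun x => x.2.2.2) false).filter (fun x => x.2.1 == r))
    (fun x => x.2.2.1) []
    (fun x l => l)
    (fun x l => l ++ [x.2.2.2])
    (fun c hc => by
      simp only [List.mem_map] at hc ⊢
      obtain ⟨x, hx, hxc⟩ := hc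
      exact ⟨x, (hperm.filter _).mem_iff.mp hx, hxc⟩)]
  refine List.map_congr_left (fun o _ => ?_)
  refine congrArg (Prod.mk o) ?_
  rw [List.foldl_fixed, PySem.List.foldl_append_singleton_eq_map, List.nil_append]
  simp only [List.filter_filter]
  exact (map_filter_sorted_eq triples _).symm

-- ===== VERDICT (by name: the statement is the Claim_ definition above) =====
theorem build_ro_history_spec : Claim_equal_build_ro_history := by
  intro triples _
  show build_ro_history triples = build_ro_history_alt triples
  rw [A_eq_canon, B_eq_canon]
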